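-- pv_equiv track=rewrite | github.com/sonyaallin/eecs4401 | assignments/assignment-resources/more-resources/2023/Self-Assessments/Assignment2/cenicero/funpuzz_csp.py | div_solver
-- ===== SOURCE A (Python) =====
-- def div_solver(curr_target,dom,n):
--    #generate a list of all tuples of n numbers in dom where dividing the numbers
--    #from the left will result in curr_target
--    if n == 1:
--       # return [[i]] where i == curr_target, if it is not in dom, then it returns []
--       if curr_target in dom:
--          return [[curr_target]]
--       else:
--          return None
--    sltns = []
--    for x in dom:
--       # disregard any values of x that is not a factor of curr_target
--       new_target = curr_target*x
--       partial_sltns = div_solver(new_target,dom,n-1)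
--       if partial_sltns is None:
--          continue
--       for s in partial_sltns:
--          sltns.append(s + [x])
--    return sltns
-- ===== SOURCE B (Python) =====
-- def div_solver(curr_target, dom, n):
--     # Iterative: build all (n-1)-tails breadth-first, then compute the head in
--     # closed form (curr_target times the product of the tail) and keep it if in dom.
--     if n == 1:
--         return [[curr_target]] if curr_target in dom else None
--     tails = [[]]
--     for _ in range(n - 1):
--         tails = [t + [x] for x in dom for t in tails]
--     sltns = []
--     for t in tails:
--         a1 = curr_target
--         for x in t:
--             a1 *= x
--         if a1 in dom:
--             sltns.append([a1] + t)
--     return sltns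
-- ===== Notes on version B (the rewrite author's own statement) =====
-- stated objective: alternative
-- what changed: Replaces the recursion with an iterative breadth-first build of all (n-1)-element tails followed by a closed-form computation of the leading element (curr_target times the tail product); the recursive None-propagation disappears.
import Mathlib
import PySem

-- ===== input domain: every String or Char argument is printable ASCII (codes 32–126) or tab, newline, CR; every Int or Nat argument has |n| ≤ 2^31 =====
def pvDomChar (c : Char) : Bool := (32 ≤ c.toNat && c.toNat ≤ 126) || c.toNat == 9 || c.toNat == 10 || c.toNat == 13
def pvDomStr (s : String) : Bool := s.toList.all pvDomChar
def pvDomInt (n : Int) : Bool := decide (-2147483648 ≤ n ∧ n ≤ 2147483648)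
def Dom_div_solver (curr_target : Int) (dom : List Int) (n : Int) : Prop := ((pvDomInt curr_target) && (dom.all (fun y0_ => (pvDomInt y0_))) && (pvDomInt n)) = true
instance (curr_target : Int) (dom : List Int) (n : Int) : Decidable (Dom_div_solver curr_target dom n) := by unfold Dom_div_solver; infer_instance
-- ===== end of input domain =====

-- B builds the answer iteratively (all tails, then a closed-form head) instead of A's recursion; same cost, no recursion.

-- ===== PORT A =====
-- A's recursion counts n down to the base case n == 1; we recurse on the Nat m = n - 1
-- (divA_go dom m c computes A's div_solver(c, dom, m+1)).
def divA_go (dom : List Int) : Nat → Int → Option (List (List Int))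
  | 0, c => if c ∈ dom then some [[c]] else none
  | m + 1, c =>
      some (dom.foldl (fun sltns x =>
        match divA_go dom m (c * x) with
        | none => sltns
        | some ps => sltns ++ ps.map (fun s => s ++ [x])) [])

def div_solver (curr_target : Int) (dom : List Int) (n : Int) : Option (List (List Int)) :=
  if 1 ≤ n then divA_go dom (n - 1).toNat curr_target
  -- for n ≤ 0 the Python recursion terminates only when dom = [], returning []; this
  -- totality branch returns that value (inputs with n ≤ 0 and dom ≠ [] are outside Pre_)
  else some []

-- ===== PORT B =====
def divB_step (dom : List Int) (ts : List (List Int)) : List (List Int) :=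
  dom.flatMap (fun x => ts.map (fun t => t ++ [x]))

def divB_tails (dom : List Int) : Nat → List (List Int)
  | 0 => [[]]
  | k + 1 => divB_step dom (divB_tails dom k)

def div_solver_alt (curr_target : Int) (dom : List Int) (n : Int) : Option (List (List Int)) :=
  if n = 1 then (if curr_target ∈ dom then some [[curr_target]] else none)
  else
    some ((divB_tails dom (n - 1).toNat).foldl (fun sltns t =>
      let a1 := t.foldl (fun a x => a * x) curr_target
      if a1 ∈ dom then sltns ++ [a1 :: t] else sltns) [])

-- ===== PRECONDITION & SPEC =====
-- Pre_ excludes only n ≤ 0 with nonempty dom, where A's recursion never reaches the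
-- base case and raises RecursionError (A returns no value there).
def Pre_div_solver (curr_target : Int) (dom : List Int) (n : Int) : Prop :=
  1 ≤ n ∨ dom = []
instance (curr_target : Int) (dom : List Int) (n : Int) : Decidable (Pre_div_solver curr_target dom n) := by unfold Pre_div_solver; infer_instance
def pvWitness_div_solver : Int × List Int × Int := (2, [2, 3, 6], 2)

def Spec_div_solver (curr_target : Int) (dom : List Int) (n : Int) (out : Option (List (List Int))) : Prop := out = div_solver_alt curr_target dom n
instance (curr_target : Int) (dom : List Int) (n : Int) (out : Option (List (List Int))) : Decidable (Spec_div_solver curr_target dom n out) := by unfold Spec_div_solver; infer_instance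

-- ===== CLAIM (what is proved, stated in full; the proofs are below) =====
def Claim_equal_div_solver : Prop := ∀ (curr_target : Int) (dom : List Int) (n : Int), Dom_div_solver curr_target dom n → Pre_div_solver curr_target dom n → Spec_div_solver curr_target dom n (div_solver curr_target dom n)

-- ===== LEMMAS AND PROOFS =====

-- B's emit test/row as a filterMap step
def divF (dom : List Int) (c : Int) (t : List Int) : Option (List Int) :=
  let a1 := t.foldl (fun a x => a * x) c
  if a1 ∈ dom then some (a1 :: t) else none

theorem foldl_collect_eq_filterMap (dom : List Int) (c : Int) (ts : List (List Int))
    (acc : List (List Int)) :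
    ts.foldl (fun sltns t =>
      let a1 := t.foldl (fun a x => a * x) c
      if a1 ∈ dom then sltns ++ [a1 :: t] else sltns) acc
      = acc ++ ts.filterMap (divF dom c) := by
  induction ts generalizing acc with
  | nil => simp
  | cons t ts ih =>
      simp only [List.foldl_cons, List.filterMap_cons, divF]
      by_cases h : (t.foldl (fun a x => a * x) c) ∈ dom <;> simp [divF, h, ih]

theorem foldl_mul_shift (t : List Int) (a b : Int) :
    t.foldl (fun u x => u * x) (a * b) = t.foldl (fun u x => u * x) a * b := by
  induction t generalizing a with
  | nil => rfl
  | cons y t ih =>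
      simp only [List.foldl_cons]
      rw [mul_right_comm, ih]

theorem divF_append (dom : List Int) (c x : Int) (t : List Int) :
    divF dom c (t ++ [x]) = (divF dom (c * x) t).map (fun s => s ++ [x]) := by
  simp only [divF, List.foldl_append, List.foldl_cons, List.foldl_nil]
  rw [foldl_mul_shift]
  by_cases h : (t.foldl (fun u x => u * x) c * x) ∈ dom <;> simp [h]

theorem foldl_match_eq_flatMap (dom : List Int) (g : Int → Option (List (List Int)))
    (acc : List (List Int)) :
    dom.foldl (fun sltns x =>
        match g x with
        | none => sltns
        | some ps => sltns ++ ps.map (fun s => s ++ [x])) acc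
      = acc ++ dom.flatMap (fun x => ((g x).getD []).map (fun s => s ++ [x])) := by
  induction dom generalizing acc with
  | nil => simp
  | cons y ys ih =>
      simp only [List.foldl_cons, List.flatMap_cons]
      cases h : g y <;> simp [ih]

-- Main invariant: for n ≥ 2 (i.e. level m+1), A's recursion computes B's
-- filter-map of the tail list.
theorem divA_go_eq (dom : List Int) (m : Nat) (c : Int) :
    divA_go dom (m + 1) c
      = some ((divB_tails dom (m + 1)).filterMap (divF dom c)) := by
  induction m generalizing c with
  | zero =>
      simp only [divA_go, divB_tails, divB_step]
      rw [foldl_match_eq_flatMap]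
      congr 1
      simp only [List.nil_append, List.filterMap_flatMap, List.filterMap_map]
      refine List.flatMap_congr (fun x _ => ?_)
      simp only [divF, Function.comp]
      by_cases h : (c * x) ∈ dom <;> simp [h]
  | succ m ih =>
      conv_lhs => rw [divA_go]
      rw [foldl_match_eq_flatMap]
      congr 1
      simp only [List.nil_append]
      conv_rhs => rw [divB_tails]
      simp only [divB_step, List.filterMap_flatMap, List.filterMap_map, ih, Option.getD_some,
        List.map_filterMap, Function.comp]
      refine List.flatMap_congr (fun x _ => ?_)
      refine (List.filterMap_congr (fun t _ => ?_)).symm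
      exact divF_append dom c x t

-- ===== VERDICT (by name: the statement is the Claim_ definition above) =====
theorem div_solver_spec : Claim_equal_div_solver := by
  intro c dom n _ hpre
  unfold Spec_div_solver div_solver div_solver_alt
  by_cases h1 : n = 1
  · subst h1
    simp [divA_go]
  · rcases hpre with hn | hd
    · have h2 : 2 ≤ n := by omega
      have hle : 1 ≤ n := by omega
      have hm : (n - 1).toNat = (n - 2).toNat + 1 := by omega
      rw [if_pos hle, if_neg h1, hm, divA_go_eq]
      rw [foldl_collect_eq_filterMap]
      simp
    · subst hd
      by_cases hle : 1 ≤ n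
      · have hm : (n - 1).toNat = ((n-1).toNat - 1) + 1 := by omega
        rw [if_pos hle, if_neg h1, hm, divA_go_eq]
        rw [foldl_collect_eq_filterMap]
        simp [divF]
      · rw [if_neg hle, if_neg h1]
        have : (n - 1).toNat = 0 := by omega
        rw [this]
        simp [divB_tails]
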